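-- pv_equiv track=rewrite | github.com/JaeEon-Ryu/Coding_test | Programmers/Level_1/Lv1_예산.py | solution
-- ===== SOURCE A (Python) =====
-- def solution(d, budget):
--     answer = 0
--     d_sum = 0
--     d.sort()
--
--     for num in d:
--         if d_sum + num > budget:
--             break
--         else:
--             d_sum += num
--             answer += 1
--
--     return answer
-- ===== SOURCE B (Python) =====
-- def solution(d, budget):
--     d.sort()
--     rest = d[::-1]          # stack: smallest element on top
--     while rest and rest[-1] <= budget:
--         budget -= rest.pop()
--     return len(d) - len(rest)
-- ===== Notes on version B (the rewrite author's own statement) =====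
-- stated objective: alternative
-- what changed: Replaces the for-loop threading a running total and a counter with a stack-consumption loop: the sorted items are pushed on a stack (reversed copy), a while loop pops affordable items while decrementing the remaining budget, and the count is recovered as len(d) - len(rest) -- no running sum and no counter are maintained.
import Mathlib
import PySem

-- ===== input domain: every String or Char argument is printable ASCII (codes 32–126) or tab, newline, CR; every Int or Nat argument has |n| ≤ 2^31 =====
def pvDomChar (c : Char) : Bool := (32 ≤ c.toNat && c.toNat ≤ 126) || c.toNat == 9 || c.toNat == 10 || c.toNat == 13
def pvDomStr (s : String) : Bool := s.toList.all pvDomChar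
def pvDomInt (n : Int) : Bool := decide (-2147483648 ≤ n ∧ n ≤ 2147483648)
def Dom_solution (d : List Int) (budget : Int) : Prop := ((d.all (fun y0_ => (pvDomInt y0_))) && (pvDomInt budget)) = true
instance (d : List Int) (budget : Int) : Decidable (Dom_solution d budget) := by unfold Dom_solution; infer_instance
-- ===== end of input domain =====

-- B replaces A's for-loop (running total + counter) by a stack-consumption while
-- loop on a reversed copy that decrements the remaining budget; the count is
-- recovered as len(d) - len(rest). Same cost, different state maintained.
-- Both A and B sort the argument in place in Python; the equivalence proved here
-- is about the return value.

-- ===== PORT A =====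
-- the for-loop with break, threading (answer, d_sum)
def solutionLoop (budget : Int) : List Int → Int → Int → Int
  | [], answer, _ => answer
  | num :: rest, answer, d_sum =>
      if d_sum + num > budget then answer
      else solutionLoop budget rest (answer + 1) (d_sum + num)

def solution (d : List Int) (budget : Int) : Int :=
  solutionLoop budget (PySem.List.sorted d (fun x => x) false) 0 0

-- ===== PORT B =====
-- the while loop: pop rest[-1] while it fits, decrementing the budget
def altLoop (budget : Int) (rest : List Int) : List Int :=
  match h : rest.getLast? with
  | none => rest
  | some x => if x ≤ budget then altLoop (budget - x) rest.dropLast else rest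
termination_by rest.length
decreasing_by
  cases rest with
  | nil => simp at h
  | cons a t => simp [List.length_dropLast]

def solution_alt (d : List Int) (budget : Int) : Int :=
  ((PySem.List.sorted d (fun x => x) false).length : Int) -
    ((altLoop budget ((PySem.List.sorted d (fun x => x) false).reverse)).length : Int)

-- ===== PRECONDITION & SPEC =====
def Spec_solution (d : List Int) (budget : Int) (out : Int) : Prop := out = solution_alt d budget
instance (d : List Int) (budget : Int) (out : Int) : Decidable (Spec_solution d budget out) := by unfold Spec_solution; infer_instance

-- ===== CLAIM (what is proved, stated in full; the proofs are below) =====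
def Claim_equal_solution : Prop := ∀ (d : List Int) (budget : Int), Dom_solution d budget → Spec_solution d budget (solution d budget)

-- ===== LEMMAS AND PROOFS =====
theorem altLoop_nil (b : Int) : altLoop b [] = [] := by
  rw [altLoop]; simp

theorem altLoop_concat (b : Int) (ys : List Int) (n : Int) :
    altLoop b (ys ++ [n]) = if n ≤ b then altLoop (b - n) ys else ys ++ [n] := by
  rw [altLoop]
  split <;> rename_i h
  · rw [List.getLast?_concat] at h; cases h
  · rw [List.getLast?_concat] at h
    obtain rfl : n = _ := Option.some.inj h
    simp

theorem solutionLoop_eq (budget : Int) (xs : List Int) :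
    ∀ (a s : Int),
      solutionLoop budget xs a s =
        a + (xs.length : Int) - ((altLoop (budget - s) xs.reverse).length : Int) := by
  induction xs with
  | nil => intro a s; simp [solutionLoop, altLoop_nil]
  | cons n r ih =>
      intro a s
      by_cases h : s + n > budget
      · have h' : ¬ (n ≤ budget - s) := by omega
        simp [solutionLoop, h, List.reverse_cons, altLoop_concat, h']
      · have h' : n ≤ budget - s := by omega
        have hb : budget - s - n = budget - (s + n) := by omega
        simp [solutionLoop, h, List.reverse_cons, altLoop_concat, h', hb, ih]
        omega

-- ===== VERDICT (by name: the statement is the Claim_ definition above) =====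
theorem solution_spec : Claim_equal_solution := by
  intro d budget _
  unfold Spec_solution solution solution_alt
  rw [solutionLoop_eq]
  simp
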